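-- pv_equiv track=rewrite | github.com/demisto/dockerfiles | docker/script-sentinel/sentinel/scorers/content.py | _is_decision_node
-- ===== SOURCE A (Python) =====
-- def _is_decision_node(node_type: str) -> bool:
--     """
--     Check if AST node type represents a decision point.
--
--     Supports multiple language AST formats:
--     - PowerShell: IfStatementAst, WhileStatementAst, ForStatementAst, etc.
--     - Bash: if, while, for, case, operator (&&, ||)
--     - Python: If, While, For, Try, BoolOp
--     - JavaScript: if_statement, while_statement, for_statement, etc.
--
--     Args:
--         node_type: AST node type string
--
--     Returns:
--         True if node represents a decision point, False otherwise
--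
--     Examples:
--         >>> scorer = ContentIntelligenceScorer({})
--         >>> scorer._is_decision_node('If')
--         True
--         >>> scorer._is_decision_node('IfStatementAst')
--         True
--         >>> scorer._is_decision_node('if_statement')
--         True
--         >>> scorer._is_decision_node('Assignment')
--         False
--     """
--     if not node_type:
--         return False
--
--     # Normalize to lowercase for case-insensitive matching
--     node_type_lower = node_type.lower()
--
--     # Decision node patterns (language-agnostic)
--     decision_patterns = [
--         # Conditional statements
--         "if",
--         "elif",
--         "elseif",
--         "else if",
--         # Loop statements
--         "while",
--         "for",
--         "foreach",
--         "do",
--         # Switch/case statements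
--         "switch",
--         "case",
--         # Exception handling
--         "try",
--         "catch",
--         "except",
--         # Boolean operators
--         "and",
--         "or",
--         "boolop",
--         "&&",
--         "||",
--         # Ternary/conditional expressions
--         "conditional",
--         "ternary",
--     ]
--
--     # Check if node type contains any decision pattern
--     return any(pattern in node_type_lower for pattern in decision_patterns)
-- ===== SOURCE B (Python) =====
-- # Minimal core pattern set: every original pattern contains one of these as a
-- # substring ("elif"/"elseif"/"else if" contain "if"; "for"/"foreach" contain "or"),
-- # so containment over this reduced set is equivalent to the original test.
-- _CORE_PATTERNS = (
--     "if", "while", "or", "do", "switch", "case",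
--     "try", "catch", "except", "and", "boolop",
--     "&&", "||", "conditional", "ternary",
-- )
--
--
-- def _is_decision_node(node_type: str) -> bool:
--     # single left-to-right suffix scan: at each position, test whether a core
--     # pattern starts there (instead of one full substring scan per pattern)
--     s = node_type.lower()
--     while s:
--         if s.startswith(_CORE_PATTERNS):
--             return True
--         s = s[1:]
--     return False
-- ===== Notes on version B (the rewrite author's own statement) =====
-- stated objective: alternative
-- what changed: A runs one whole-string substring scan per pattern over the full 20-pattern list; B first reduces the list to a 15-pattern core (every dropped pattern contains a kept one, e.g. 'elif' contains 'if', 'foreach' contains 'or') and then does a single left-to-right suffix scan testing at each position whether a core pattern starts there, with no separate empty-string guard; B trades speed for this decomposition (its suffix slicing is quadratic in Python).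
import Mathlib
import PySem

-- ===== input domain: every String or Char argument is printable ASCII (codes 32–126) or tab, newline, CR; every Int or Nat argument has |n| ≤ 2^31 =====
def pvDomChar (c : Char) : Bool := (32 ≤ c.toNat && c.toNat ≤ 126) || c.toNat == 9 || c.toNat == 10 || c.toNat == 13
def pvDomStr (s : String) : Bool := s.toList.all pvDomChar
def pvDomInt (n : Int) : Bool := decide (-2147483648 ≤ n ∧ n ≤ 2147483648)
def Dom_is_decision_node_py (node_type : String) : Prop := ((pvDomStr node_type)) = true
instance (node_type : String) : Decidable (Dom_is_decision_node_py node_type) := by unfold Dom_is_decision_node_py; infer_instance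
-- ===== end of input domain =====

-- B replaces A's per-pattern whole-string scans over 20 patterns with a single
-- suffix scan over a reduced 15-pattern core list (alternative decomposition).

-- ===== PORT A =====
-- A's full decision-pattern list, in A's order
def pvDecisionPatterns : List (List Char) :=
  ["if".toList, "elif".toList, "elseif".toList, "else if".toList,
   "while".toList, "for".toList, "foreach".toList, "do".toList,
   "switch".toList, "case".toList,
   "try".toList, "catch".toList, "except".toList,
   "and".toList, "or".toList, "boolop".toList, "&&".toList, "||".toList,
   "conditional".toList, "ternary".toList]

def is_decision_node_py (node_type : String) : Bool :=
  if node_type.toList = [] then false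
  else
    let node_type_lower := PySem.Chars.lower node_type.toList
    pvDecisionPatterns.any (fun pattern => PySem.Chars.isIn pattern node_type_lower)

-- ===== PORT B =====
-- B's reduced core list (every pattern of A's list contains one of these)
def pvCorePatterns : List (List Char) :=
  ["if".toList, "while".toList, "or".toList, "do".toList, "switch".toList,
   "case".toList, "try".toList, "catch".toList, "except".toList, "and".toList,
   "boolop".toList, "&&".toList, "||".toList, "conditional".toList, "ternary".toList]

-- the while-suffix loop of B: test core prefixes at each position, then drop one char
def pvSuffixScan : List Char → Bool
  | [] => false
  | c :: rest =>
    if pvCorePatterns.any (fun p => PySem.Chars.startswith (c :: rest) p) then true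
    else pvSuffixScan rest

def is_decision_node_py_alt (node_type : String) : Bool :=
  pvSuffixScan (PySem.Chars.lower node_type.toList)

-- ===== PRECONDITION & SPEC =====
def Spec_is_decision_node_py (node_type : String) (out : Bool) : Prop := out = is_decision_node_py_alt node_type
instance (node_type : String) (out : Bool) : Decidable (Spec_is_decision_node_py node_type out) := by unfold Spec_is_decision_node_py; infer_instance

-- ===== CLAIM =====
def Claim_equal_is_decision_node_py : Prop := ∀ (node_type : String), Dom_is_decision_node_py node_type → Spec_is_decision_node_py node_type (is_decision_node_py node_type)

-- ===== LEMMAS AND PROOFS =====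

-- the suffix scan decides "some core pattern is an infix"
theorem pvSuffixScan_iff (s : List Char) :
    pvSuffixScan s = true ↔ ∃ q ∈ pvCorePatterns, q <:+: s := by
  induction s with
  | nil =>
    simp only [pvSuffixScan]
    rw [Bool.false_eq_true, false_iff]
    rintro ⟨q, hq, hinf⟩
    have : q = [] := List.eq_nil_of_infix_nil hinf
    subst this
    revert hq; decide
  | cons c rest ih =>
    simp only [pvSuffixScan]
    split
    · rename_i h
      simp only [true_iff]
      simp only [List.any_eq_true, PySem.Chars.startswith_iff] at h
      obtain ⟨q, hq, hpre⟩ := h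
      exact ⟨q, hq, hpre.isInfix⟩
    · rename_i h
      rw [ih]
      constructor
      · rintro ⟨q, hq, hinf⟩
        exact ⟨q, hq, hinf.trans (List.suffix_cons c rest).isInfix⟩
      · rintro ⟨q, hq, hinf⟩
        rcases (List.infix_cons_iff.mp hinf) with hpre | hsuf
        · exfalso
          apply h
          simp only [List.any_eq_true, PySem.Chars.startswith_iff]
          exact ⟨q, hq, hpre⟩
        · exact ⟨q, hq, hsuf⟩

-- every full pattern contains a core pattern, and every core pattern is a full pattern
theorem pvFull_has_core : ∀ p ∈ pvDecisionPatterns, ∃ q ∈ pvCorePatterns, q <:+: p := by decide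

theorem pvCore_in_full : ∀ q ∈ pvCorePatterns, q ∈ pvDecisionPatterns := by decide

theorem pvFull_any_iff (s : List Char) :
    pvDecisionPatterns.any (fun p => PySem.Chars.isIn p s) = true
      ↔ ∃ q ∈ pvCorePatterns, q <:+: s := by
  simp only [List.any_eq_true, PySem.Chars.isIn_iff_infix]
  constructor
  · rintro ⟨p, hp, hinf⟩
    obtain ⟨q, hq, hqp⟩ := pvFull_has_core p hp
    exact ⟨q, hq, hqp.trans hinf⟩
  · rintro ⟨q, hq, hinf⟩
    exact ⟨q, pvCore_in_full q hq, hinf⟩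

-- ===== VERDICT =====
theorem is_decision_node_py_spec : Claim_equal_is_decision_node_py := by
  intro node_type _
  unfold Spec_is_decision_node_py is_decision_node_py is_decision_node_py_alt
  split
  · rename_i h
    rw [h]
    rfl
  · rw [Bool.eq_iff_iff, pvFull_any_iff, pvSuffixScan_iff]
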